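-- pv_equiv track=rewrite | github.com/NicovincX2/interviews | knight_dialer.py | count_sequences_log
-- ===== SOURCE A (Python) =====
-- NEIGHBORS_MATRIX = {
--     0: (0, 0, 0, 0, 1, 0, 1, 0, 0, 0),
--     1: (0, 0, 0, 0, 0, 0, 1, 0, 1, 0),
--     2: (0, 0, 0, 0, 0, 0, 0, 1, 0, 1),
--     3: (0, 0, 0, 1, 0, 0, 0, 0, 1, 0),
--     4: (1, 0, 0, 1, 0, 0, 0, 0, 0, 1),
--     5: (0, 0, 0, 0, 0, 0, 0, 0, 0, 0),
--     6: (1, 1, 0, 0, 0, 0, 0, 1, 0, 0),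
--     7: (0, 0, 1, 0, 0, 0, 1, 0, 0, 0),
--     8: (0, 1, 0, 1, 0, 0, 0, 0, 0, 0),
--     9: (0, 0, 1, 0, 1, 0, 0, 0, 0, 0),
-- }
--
-- def matrix_multiply(A, B):
--     A_rows, _ = len(A), len(A[0])
--     B_rows, B_cols = len(B), len(B[0])
--     result = list(map(lambda i: [0] * B_cols, range(A_rows)))
--
--     for row in range(A_rows):
--         for col in range(B_cols):
--             for i in range(B_rows):
--                 result[row][col] += A[row][i] * B[i][col]
--
--     return result
--
-- def count_sequences_log(start_position, num_hops):
--     # Start off with a 10x10 identity matrix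
--     accum = [[1 if i == j else 0 for i in range(10)] for j in range(10)]
--
--     # bin(num_hops) starts with "0b", slice it off with [2:]
--     for bit_num, bit in enumerate(reversed(bin(num_hops)[2:])):
--         if bit_num == 0:
--             import copy
--
--             power_of_2 = copy.deepcopy(NEIGHBORS_MATRIX)
--         else:
--             power_of_2 = matrix_multiply(power_of_2, power_of_2)
--
--         if bit == "1":
--             accum = matrix_multiply(accum, power_of_2)
--
--     return matrix_multiply(accum, [[1]] * 10)[start_position][0]
-- ===== SOURCE B (Python) =====
-- # Top-down recursive matrix exponentiation (halving), counts read as a row sum.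
-- MOVES = [(4, 6), (6, 8), (7, 9), (3, 8), (0, 3, 9), (), (0, 1, 7), (2, 6), (1, 3), (2, 4)]
--
-- ADJ = [[1 if j in MOVES[i] else 0 for j in range(10)] for i in range(10)]
--
--
-- def _mul(X, Y):
--     return [[sum(X[i][k] * Y[k][j] for k in range(10)) for j in range(10)] for i in range(10)]
--
--
-- def _mat_pow(n):
--     if n <= 0:
--         return [[1 if i == j else 0 for j in range(10)] for i in range(10)]
--     half = _mat_pow(n // 2)
--     sq = _mul(half, half)
--     return _mul(sq, ADJ) if n % 2 else sq
--
--
-- def count_sequences_log(start_position, num_hops):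
--     return sum(_mat_pow(num_hops)[start_position])
-- ===== Notes on version B (the rewrite author's own statement) =====
-- stated objective: alternative
-- what changed: Replaces the LSB-first bit-string loop (enumerate over reversed bin(n)) carrying an accumulator and running power-of-two matrix with a top-down recursive matrix power (halving n), an adjacency built from neighbor move lists, comprehension-based multiplication, and a direct row sum instead of multiplying by a ones column.
-- intended difference: On negative num_hops (with start_position in range) A's bin() scan drops only the '-' sign and so returns the sequence count for |num_hops| (e.g. A(0,-1)=2), while B treats a negative hop count as no hops remaining and returns 1, the intended value since a negative number of hops allows only the empty sequence. — e.g. on count_sequences_log(0, -1): A returns 2, B returns 1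
import Mathlib
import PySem

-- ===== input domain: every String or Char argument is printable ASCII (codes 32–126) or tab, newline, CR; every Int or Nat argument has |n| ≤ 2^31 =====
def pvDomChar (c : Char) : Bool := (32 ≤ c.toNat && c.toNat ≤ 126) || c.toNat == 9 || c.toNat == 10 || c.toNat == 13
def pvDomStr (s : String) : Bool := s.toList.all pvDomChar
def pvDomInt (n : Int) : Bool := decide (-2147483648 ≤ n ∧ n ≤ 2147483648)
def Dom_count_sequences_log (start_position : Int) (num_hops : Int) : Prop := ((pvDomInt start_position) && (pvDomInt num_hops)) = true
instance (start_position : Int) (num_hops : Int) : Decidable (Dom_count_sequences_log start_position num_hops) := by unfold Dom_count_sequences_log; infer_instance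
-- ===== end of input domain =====

-- B replaces A's LSB-first bin()-string scan (accumulator + running power-of-two matrix)
-- with a top-down recursive matrix power (halving the exponent) and a direct row sum.

-- ===== PORT A =====

-- NEIGHBORS_MATRIX: dict with keys 0..9 in order, rows as 10-tuples (port: list of rows).
def pvNeighbors : List (List Int) :=
  [[0,0,0,0,1,0,1,0,0,0],
   [0,0,0,0,0,0,1,0,1,0],
   [0,0,0,0,0,0,0,1,0,1],
   [0,0,0,1,0,0,0,0,1,0],
   [1,0,0,1,0,0,0,0,0,1],
   [0,0,0,0,0,0,0,0,0,0],
   [1,1,0,0,0,0,0,1,0,0],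
   [0,0,1,0,0,0,1,0,0,0],
   [0,1,0,1,0,0,0,0,0,0],
   [0,0,1,0,1,0,0,0,0,0]]

-- matrix_multiply: preallocated zero result, triple nested loop mutating result[row][col].
-- Indexing A[row][i], B[i][col] is ported with getD (always in range at A's call sites).
def pvMatMul (A B : List (List Int)) : List (List Int) :=
  let A_rows := A.length
  let B_rows := B.length
  let B_cols := (B.getD 0 []).length
  let result := (List.range A_rows).map (fun _ => List.replicate B_cols (0 : Int))
  (List.range A_rows).foldl (fun result row =>
    (List.range B_cols).foldl (fun result col =>
      (List.range B_rows).foldl (fun result i =>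
        result.set row ((result.getD row []).set col
          ((result.getD row []).getD col 0 +
            (A.getD row []).getD i 0 * (B.getD i []).getD col 0))) result) result) result

-- bin(n)[2:] : binary digits of a nonneg number, MSB first ('0' for 0); for n < 0 the
-- slice keeps the 'b' of '-0b…', so the character list is 'b' :: digits of |n|.
def pvNatBinPos (n : Nat) : List Char :=
  if h : n = 0 then []
  else pvNatBinPos (n / 2) ++ [if n % 2 = 1 then '1' else '0']
  decreasing_by exact Nat.div_lt_self (Nat.pos_of_ne_zero h) (by omega)

def pvBin (n : Nat) : List Char := if n = 0 then ['0'] else pvNatBinPos n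

-- loop body: state (accum, power_of_2); pair (bit, bit_num) from enumerate(reversed(...)).
def pvStepA (st : List (List Int) × List (List Int)) (p : Char × Nat) :
    List (List Int) × List (List Int) :=
  let power := if p.2 = 0 then pvNeighbors else pvMatMul st.2 st.2
  let accum := if p.1 = '1' then pvMatMul st.1 power else st.1
  (accum, power)

def count_sequences_log (start_position : Int) (num_hops : Int) : Int :=
  let accum := (List.range 10).map (fun j => (List.range 10).map (fun i => if i = j then (1 : Int) else 0))
  let chars : List Char :=
    if num_hops < 0 then 'b' :: pvBin num_hops.natAbs else pvBin num_hops.natAbs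
  let st := (chars.reverse.zipIdx).foldl pvStepA (accum, [])
  let final := pvMatMul st.1 (List.replicate 10 [(1 : Int)])
  -- final[start_position][0]; out-of-range start raises IndexError (excluded by Pre_)
  ((PySem.List.pyGet? final start_position).bind (fun row => PySem.List.pyGet? row 0)).getD 0

-- ===== PORT B =====

def pvMoves : List (List Int) :=
  [[4,6],[6,8],[7,9],[3,8],[0,3,9],[],[0,1,7],[2,6],[1,3],[2,4]]

def pvAdj : List (List Int) :=
  (List.range 10).map (fun i => (List.range 10).map
    (fun j => if (pvMoves.getD i []).contains ((j : Nat) : Int) then (1 : Int) else 0))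

def pvMulB (X Y : List (List Int)) : List (List Int) :=
  (List.range 10).map (fun i => (List.range 10).map
    (fun j => ((List.range 10).map
      (fun k => (X.getD i []).getD k 0 * (Y.getD k []).getD j 0)).sum))

def pvMatPow (n : Int) : List (List Int) :=
  if h : n ≤ 0 then
    (List.range 10).map (fun i => (List.range 10).map (fun j => if i = j then (1 : Int) else 0))
  else
    let half := pvMatPow (PySem.Int.floordiv n 2)
    let sq := pvMulB half half
    if PySem.Int.mod n 2 ≠ 0 then pvMulB sq pvAdj else sq
  termination_by n.toNat
  decreasing_by
    have h2 : PySem.Int.floordiv n 2 = n / 2 := PySem.Int.floordiv_eq_ediv_of_pos (by omega)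
    omega

def count_sequences_log_alt (start_position : Int) (num_hops : Int) : Int :=
  ((PySem.List.pyGet? (pvMatPow num_hops) start_position).getD []).sum

-- ===== PRECONDITION & SPEC =====
-- A raises IndexError iff start_position is outside Python's index range -10..9.
def Pre_count_sequences_log (start_position : Int) (num_hops : Int) : Prop :=
  -10 ≤ start_position ∧ start_position < 10
instance (start_position : Int) (num_hops : Int) : Decidable (Pre_count_sequences_log start_position num_hops) := by unfold Pre_count_sequences_log; infer_instance
def pvWitness_count_sequences_log : Int × Int := (0, 2)

-- On negative num_hops (start in range) A's bin() scan drops only the '-' sign and returns the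
-- sequence count for |num_hops|, while B treats a negative hop count as no hops remaining and
-- returns 1, the intended value since a negative number of hops allows only the empty sequence.
def D_count_sequences_log (start_position : Int) (num_hops : Int) : Prop := num_hops < 0
instance (start_position : Int) (num_hops : Int) : Decidable (D_count_sequences_log start_position num_hops) := by unfold D_count_sequences_log; infer_instance

def Spec_count_sequences_log (start_position : Int) (num_hops : Int) (out : Int) : Prop := ¬ D_count_sequences_log start_position num_hops → out = count_sequences_log_alt start_position num_hops
instance (start_position : Int) (num_hops : Int) (out : Int) : Decidable (Spec_count_sequences_log start_position num_hops out) := by unfold Spec_count_sequences_log; infer_instance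

def pvDiffWitness_count_sequences_log : Int × Int := (0, -1)
def pvDiffWitnessOut_count_sequences_log : Int × Int := (2, 1)

-- ===== CLAIM (what is proved, stated in full; the proofs are below) =====
def Claim_unchanged_count_sequences_log : Prop := ∀ (start_position : Int) (num_hops : Int), Dom_count_sequences_log start_position num_hops → Pre_count_sequences_log start_position num_hops → Spec_count_sequences_log start_position num_hops (count_sequences_log start_position num_hops)
def Claim_changed_count_sequences_log : Prop := Dom_count_sequences_log (pvDiffWitness_count_sequences_log.1) (pvDiffWitness_count_sequences_log.2) ∧ Pre_count_sequences_log (pvDiffWitness_count_sequences_log.1) (pvDiffWitness_count_sequences_log.2) ∧ D_count_sequences_log (pvDiffWitness_count_sequences_log.1) (pvDiffWitness_count_sequences_log.2) ∧ count_sequences_log (pvDiffWitness_count_sequences_log.1) (pvDiffWitness_count_sequences_log.2) = pvDiffWitnessOut_count_sequences_log.1 ∧ count_sequences_log_alt (pvDiffWitness_count_sequences_log.1) (pvDiffWitness_count_sequences_log.2) = pvDiffWitnessOut_count_sequences_log.2 ∧ pvDiffWitnessOut_count_sequences_log.1 ≠ pvDiffWitnessOut_count_sequences_log.2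
def Claim_exact_count_sequences_log : Prop := ∀ (start_position : Int) (num_hops : Int), Dom_count_sequences_log start_position num_hops → Pre_count_sequences_log start_position num_hops → D_count_sequences_log start_position num_hops → count_sequences_log start_position num_hops ≠ count_sequences_log_alt start_position num_hops

-- ===== LEMMAS AND PROOFS =====

-- canonical matrices
def pvE (P : Matrix (Fin 10) (Fin 10) ℤ) : List (List Int) :=
  List.ofFn (fun i => List.ofFn (fun j => P i j))

theorem pvE_length (P : Matrix (Fin 10) (Fin 10) ℤ) : (pvE P).length = 10 := by
  simp [pvE]

theorem pvE_getD (P : Matrix (Fin 10) (Fin 10) ℤ) (i j : Nat) (hi : i < 10) (hj : j < 10) :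
    ((pvE P).getD i []).getD j 0 = P ⟨i, hi⟩ ⟨j, hj⟩ := by
  have h1 : (pvE P).getD i [] = List.ofFn (fun j => P ⟨i, hi⟩ j) := by
    rw [pvE, List.getD_eq_getElem _ _ (by simpa using hi), List.getElem_ofFn]
  rw [h1, List.getD_eq_getElem _ _ (by simpa using hj), List.getElem_ofFn]

-- list sum over range
theorem pv_sum_range (m : Nat) (f : Nat → Int) :
    ((List.range m).map f).sum = ∑ i ∈ Finset.range m, f i := by
  induction m with
  | zero => simp
  | succ m ih => simp [List.range_succ, Finset.sum_range_succ, ih]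

theorem pv_getD_map_range {α : Type} [Inhabited α] (g : Nat → α) (q c : Nat) (hc : c < q) (d : α) :
    (((List.range q).map g).getD c d) = g c := by
  simp [List.getD, List.getElem?_map, List.getElem?_range, hc]

theorem pv_set_map_range {α : Type} (g : Nat → α) (q c : Nat) (hc : c < q) (v : α) :
    ((List.range q).map g).set c v = (List.range q).map (fun j => if j = c then v else g j) := by
  apply List.ext_getElem
  · simp
  · intro i h1 h2
    simp only [List.getElem_set, List.getElem_map, List.getElem_range]
    rcases eq_or_ne i c with h | h
    · simp [h]
    · simp [h, Ne.symm h]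

theorem pv_set_getD_self {α : Type} (l : List α) (c : Nat) (hc : c < l.length) (d : α) :
    l.set c (l.getD c d) = l := by
  apply List.ext_getElem
  · simp
  · intro i h1 h2
    simp only [List.getElem_set]
    split
    · next h => subst h; rw [List.getD_eq_getElem _ _ hc]
    · rfl

theorem pv_getD_set_self {α : Type} (l : List α) (c : Nat) (hc : c < l.length) (a d : α) :
    (l.set c a).getD c d = a := by
  rw [List.getD_eq_getElem _ _ (by simpa using hc)]
  simp [List.getElem_set]

theorem pv_inner (m : Nat) (res : List (List Int)) (row col : Nat) (f : Nat → Int)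
    (hrow : row < res.length) (hcol : col < (res.getD row []).length) :
    (List.range m).foldl (fun r i => r.set row ((r.getD row []).set col
        ((r.getD row []).getD col 0 + f i))) res
      = res.set row ((res.getD row []).set col
          ((res.getD row []).getD col 0 + ∑ i ∈ Finset.range m, f i)) := by
  induction m with
  | zero =>
      simp only [List.range_zero, List.foldl_nil, Finset.range_zero, Finset.sum_empty, add_zero]
      rw [pv_set_getD_self _ _ hcol, pv_set_getD_self _ _ hrow]
  | succ m ih =>
      rw [List.range_succ, List.foldl_append, ih, List.foldl_cons, List.foldl_nil]
      have hrow' : row < (res.set row ((res.getD row []).set col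
          ((res.getD row []).getD col 0 + ∑ i ∈ Finset.range m, f i))).length := by
        simpa using hrow
      rw [pv_getD_set_self _ _ hrow, List.set_set, pv_getD_set_self _ _ hcol, List.set_set,
        Finset.sum_range_succ, add_assoc]

theorem pv_mid (m : Nat) (row : Nat) (f : Nat → Nat → Int) (cols : List Nat) :
    ∀ (res : List (List Int)), row < res.length → (∀ c ∈ cols, c < (res.getD row []).length) →
    cols.foldl (fun r col => (List.range m).foldl (fun r i => r.set row ((r.getD row []).set col
        ((r.getD row []).getD col 0 + f col i))) r) res
      = res.set row (cols.foldl (fun rl col => rl.set col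
          (rl.getD col 0 + ∑ i ∈ Finset.range m, f col i)) (res.getD row [])) := by
  induction cols with
  | nil =>
      intro res hrow _
      simp only [List.foldl_nil]
      exact (pv_set_getD_self _ _ hrow _).symm
  | cons c cs ih =>
      intro res hrow hcols
      simp only [List.foldl_cons]
      rw [pv_inner m res row c (fun i => f c i) hrow (hcols c (by simp))]
      rw [ih _ (by simpa using hrow) ?_]
      · rw [List.set_set, pv_getD_set_self _ _ hrow]
      · intro d hd
        rw [pv_getD_set_self _ _ hrow]
        simpa using hcols d (by simp [hd])

theorem pv_rowfold_aux (q : Nat) (S : Nat → Int) (c : Nat) (hc : c ≤ q) :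
    (List.range c).foldl (fun rl col => rl.set col (rl.getD col 0 + S col)) (List.replicate q 0)
      = (List.range q).map (fun j => if j < c then S j else 0) := by
  induction c with
  | zero =>
      simp only [List.range_zero, List.foldl_nil]
      apply List.ext_getElem
      · simp
      · intro i h1 h2; simp
  | succ c ih =>
      rw [List.range_succ, List.foldl_append, ih (by omega), List.foldl_cons, List.foldl_nil]
      rw [pv_getD_map_range _ q c (by omega), pv_set_map_range _ q c (by omega)]
      apply List.map_congr_left
      intro j hj
      rcases eq_or_ne j c with h | h
      · simp [h]
      · by_cases h2 : j < c <;> simp [h, h2] <;> omega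

theorem pv_rowfold (q : Nat) (S : Nat → Int) :
    (List.range q).foldl (fun rl col => rl.set col (rl.getD col 0 + S col)) (List.replicate q 0)
      = (List.range q).map S := by
  rw [pv_rowfold_aux q S q le_rfl]
  apply List.map_congr_left
  intro j hj
  simp [List.mem_range] at hj
  simp [hj]

theorem pv_outer_aux (p q m : Nat) (f : Nat → Nat → Nat → Int) (c : Nat) (hc : c ≤ p) :
    (List.range c).foldl (fun r row => (List.range q).foldl (fun r col =>
        (List.range m).foldl (fun r i => r.set row ((r.getD row []).set col
          ((r.getD row []).getD col 0 + f row col i))) r) r)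
      ((List.range p).map (fun _ => List.replicate q 0))
      = (List.range p).map (fun r => if r < c then
          (List.range q).map (fun col => ∑ i ∈ Finset.range m, f r col i)
        else List.replicate q 0) := by
  induction c with
  | zero =>
      simp only [List.range_zero, List.foldl_nil]
      apply List.map_congr_left; intro j hj; simp
  | succ c ih =>
      rw [List.range_succ, List.foldl_append, ih (by omega), List.foldl_cons, List.foldl_nil]
      rw [pv_mid m c (fun col i => f c col i) (List.range q) _ (by simpa using hc)
        (by intro d hd
            rw [pv_getD_map_range _ p c (by omega)]
            simp at hd
            split <;> simp [hd])]
      rw [pv_getD_map_range _ p c (by omega)]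
      have hcc : ¬ c < c := by omega
      rw [if_neg hcc, pv_rowfold q, pv_set_map_range _ p c (by omega)]
      apply List.map_congr_left
      intro j hj
      rcases eq_or_ne j c with h | h
      · simp [h]
      · by_cases h2 : j < c <;> simp [h, h2] <;> omega

theorem pv_mmA_eq' (X Y : List (List Int)) :
    (let A_rows := X.length
     let B_rows := Y.length
     let B_cols := (Y.getD 0 []).length
     let result := (List.range A_rows).map (fun _ => List.replicate B_cols (0 : Int))
     (List.range A_rows).foldl (fun result row =>
       (List.range B_cols).foldl (fun result col =>
         (List.range B_rows).foldl (fun result i =>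
           result.set row ((result.getD row []).set col
             ((result.getD row []).getD col 0 +
               (X.getD row []).getD i 0 * (Y.getD i []).getD col 0))) result) result) result)
      = (List.range X.length).map (fun row => (List.range ((Y.getD 0 []).length)).map
          (fun col => ∑ i ∈ Finset.range Y.length,
            (X.getD row []).getD i 0 * (Y.getD i []).getD col 0)) := by
  simp only
  rw [pv_outer_aux X.length ((Y.getD 0 []).length) Y.length
    (fun row col i => (X.getD row []).getD i 0 * (Y.getD i []).getD col 0) X.length le_rfl]
  apply List.map_congr_left
  intro j hj
  simp [List.mem_range] at hj
  simp [hj]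


def pvM : Matrix (Fin 10) (Fin 10) ℤ :=
  Matrix.of fun i j => ((pvNeighbors.getD (i : Nat) []).getD (j : Nat) 0)

theorem pv_neighbors_eq : pvNeighbors = pvE pvM := by decide

theorem pv_adj_eq : pvAdj = pvE pvM := by decide

theorem pv_idA_eq :
    (List.range 10).map (fun j => (List.range 10).map (fun i => if i = j then (1 : Int) else 0))
      = pvE 1 := by decide

theorem pv_idB_eq :
    (List.range 10).map (fun i => (List.range 10).map (fun j => if i = j then (1 : Int) else 0))
      = pvE 1 := by decide

theorem pv_mmA (X Y : List (List Int)) :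
    pvMatMul X Y = (List.range X.length).map (fun row => (List.range ((Y.getD 0 []).length)).map
      (fun col => ∑ i ∈ Finset.range Y.length,
        (X.getD row []).getD i 0 * (Y.getD i []).getD col 0)) :=
  pv_mmA_eq' X Y

theorem pv_sum_entries (P Q : Matrix (Fin 10) (Fin 10) ℤ) (i j : Nat) (hi : i < 10) (hj : j < 10) :
    ∑ k ∈ Finset.range 10, ((pvE P).getD i []).getD k 0 * ((pvE Q).getD k []).getD j 0
      = (P * Q) ⟨i, hi⟩ ⟨j, hj⟩ := by
  rw [Matrix.mul_apply, ← Fin.sum_univ_eq_sum_range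
    (fun k => ((pvE P).getD i []).getD k 0 * ((pvE Q).getD k []).getD j 0) 10]
  apply Finset.sum_congr rfl
  intro k _
  rw [pvE_getD P i k hi k.isLt, pvE_getD Q k j k.isLt hj]

theorem pv_canon_eq (g : Nat → Nat → Int) (P : Matrix (Fin 10) (Fin 10) ℤ)
    (h : ∀ (i j : Nat) (hi : i < 10) (hj : j < 10), g i j = P ⟨i, hi⟩ ⟨j, hj⟩) :
    (List.range 10).map (fun i => (List.range 10).map (fun j => g i j)) = pvE P := by
  apply List.ext_getElem
  · rw [pvE_length]; simp
  · intro i h1 h2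
    have hi : i < 10 := by simpa using h1
    rw [List.getElem_map, List.getElem_range]
    simp only [pvE]
    rw [List.getElem_ofFn]
    apply List.ext_getElem
    · simp
    · intro j g1 g2
      have hj : j < 10 := by simpa using g1
      rw [List.getElem_map, List.getElem_range, List.getElem_ofFn]
      exact h i j hi hj

theorem pv_bridgeA (P Q : Matrix (Fin 10) (Fin 10) ℤ) :
    pvMatMul (pvE P) (pvE Q) = pvE (P * Q) := by
  have l2 : ((pvE Q).getD 0 []).length = 10 := by
    rw [pvE, List.getD_eq_getElem _ _ (by simp), List.getElem_ofFn]; simp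
  rw [pv_mmA, pvE_length P, pvE_length Q, l2]
  exact pv_canon_eq _ (P * Q) (fun i j hi hj => pv_sum_entries P Q i j hi hj)

theorem pv_bridgeB (P Q : Matrix (Fin 10) (Fin 10) ℤ) :
    pvMulB (pvE P) (pvE Q) = pvE (P * Q) := by
  unfold pvMulB
  apply pv_canon_eq _ (P * Q)
  intro i j hi hj
  rw [pv_sum_range, pv_sum_entries P Q i j hi hj]

theorem pv_ones (P : Matrix (Fin 10) (Fin 10) ℤ) :
    pvMatMul (pvE P) (List.replicate 10 [(1 : Int)])
      = (List.range 10).map (fun row => [∑ k ∈ Finset.range 10, ((pvE P).getD row []).getD k 0]) := by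
  rw [pv_mmA]
  have l1 : (pvE P).length = 10 := pvE_length P
  have l2 : ((List.replicate 10 [(1 : Int)]).getD 0 []).length = 1 := by
    rw [List.getD_eq_getElem _ _ (by simp)]
    simp
  rw [l1, l2]
  simp only [List.length_replicate, List.range_one, List.map_cons, List.map_nil]
  apply List.map_congr_left
  intro row _
  congr 1
  apply Finset.sum_congr rfl
  intro k hk
  simp only [Finset.mem_range] at hk
  have hY : (List.replicate 10 [(1 : Int)]).getD k [] = [1] := by
    rw [List.getD_eq_getElem _ _ (by simpa using hk : k < (List.replicate 10 [(1 : Int)]).length),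
      List.getElem_replicate]
  rw [hY]
  simp [List.getD]

-- ===== value of a bit string =====
def pvOfBits : List Char → Nat
  | [] => 0
  | c :: t => (if c = '1' then 1 else 0) + 2 * pvOfBits t

theorem pv_ofBits_append_b (l : List Char) (c : Char) (hc : c ≠ '1') :
    pvOfBits (l ++ [c]) = pvOfBits l := by
  induction l with
  | nil => simp [pvOfBits, hc]
  | cons d t ih => simp [pvOfBits, ih]

theorem pv_ofBits_natBinPos (k : Nat) : pvOfBits ((pvNatBinPos k).reverse) = k := by
  induction k using Nat.strong_induction_on with
  | _ k ih =>
    by_cases h : k = 0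
    · subst h; rw [pvNatBinPos]; simp [pvOfBits]
    · rw [pvNatBinPos, dif_neg h, List.reverse_append]
      simp only [List.reverse_cons, List.reverse_nil, List.nil_append, List.singleton_append]
      rw [pvOfBits]
      rw [ih (k / 2) (Nat.div_lt_self (Nat.pos_of_ne_zero h) (by omega))]
      by_cases h2 : k % 2 = 1 <;> simp [h2] <;> omega

theorem pv_ofBits_bin (k : Nat) : pvOfBits ((pvBin k).reverse) = k := by
  by_cases h : k = 0
  · subst h; simp [pvBin, pvOfBits]
  · rw [pvBin, if_neg h]; exact pv_ofBits_natBinPos k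

theorem pv_bin_ne_nil (k : Nat) : pvBin k ≠ [] := by
  rw [pvBin]
  by_cases h : k = 0
  · simp [h]
  · rw [if_neg h, pvNatBinPos, dif_neg h]; simp

-- ===== A's loop =====
theorem pv_loopA (l : List Char) : ∀ (j : Nat), 0 < j → ∀ (a : Nat),
    (l.zipIdx j).foldl pvStepA (pvE (pvM ^ a), pvE (pvM ^ (2 ^ (j - 1))))
      = (pvE (pvM ^ (a + 2 ^ j * pvOfBits l)), pvE (pvM ^ (2 ^ (j - 1 + l.length)))) := by
  induction l with
  | nil => intro j hj a; simp [pvOfBits]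
  | cons c t ih =>
    intro j hj a
    rw [List.zipIdx_cons, List.foldl_cons]
    have hpow : (2 : Nat) ^ (j - 1) + 2 ^ (j - 1) = 2 ^ j := by
      have : j - 1 + 1 = j := by omega
      calc (2:Nat) ^ (j-1) + 2 ^ (j-1) = 2 ^ (j-1) * 2 := by ring
        _ = 2 ^ (j-1+1) := (pow_succ 2 (j-1)).symm
        _ = 2 ^ j := by rw [this]
    have hstep : pvStepA (pvE (pvM ^ a), pvE (pvM ^ (2 ^ (j - 1)))) (c, j)
        = (pvE (pvM ^ (a + (if c = '1' then 1 else 0) * 2 ^ j)), pvE (pvM ^ (2 ^ j))) := by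
      unfold pvStepA
      simp only [if_neg (by omega : ¬ j = 0)]
      rw [pv_bridgeA, ← pow_add, hpow]
      by_cases hc : c = '1'
      · rw [if_pos hc, if_pos hc, pv_bridgeA, ← pow_add]; norm_num
      · rw [if_neg hc, if_neg hc]
        simp
    rw [hstep]
    have h2 : (2:Nat) ^ ((j+1) - 1) = 2 ^ j := by norm_num
    have := ih (j + 1) (by omega) (a + (if c = '1' then 1 else 0) * 2 ^ j)
    rw [h2] at this
    rw [this]
    have e1 : a + (if c = '1' then 1 else 0) * 2 ^ j + 2 ^ (j + 1) * pvOfBits t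
        = a + 2 ^ j * pvOfBits (c :: t) := by
      show _ = a + 2 ^ j * ((if c = '1' then 1 else 0) + 2 * pvOfBits t)
      rw [pow_succ]
      ring
    have e2 : j + 1 - 1 + t.length = j - 1 + (c :: t).length := by
      simp only [List.length_cons]; omega
    rw [e1, e2]

-- ===== extraction at a Python index =====
theorem pv_pyget10 {α : Type} (L : List α) (hL : L.length = 10) (s : Int)
    (h1 : -10 ≤ s) (h2 : s < 10) (d : α) :
    PySem.List.pyGet? L s = some (L.getD ((if s < 0 then s + 10 else s).toNat) d) := by
  by_cases hs : 0 ≤ s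
  · rw [PySem.List.pyGet?_of_nonneg L hs]
    have ht : s.toNat < L.length := by omega
    rw [List.getElem?_eq_getElem ht]
    have : (if s < 0 then s + 10 else s).toNat = s.toNat := by omega
    rw [this, List.getD_eq_getElem _ _ ht]
  · have hk1 : 0 < (-s).toNat := by omega
    have hk2 : (-s).toNat ≤ L.length := by omega
    have hs' : s = -(((-s).toNat : Nat) : Int) := by omega
    rw [hs', PySem.List.pyGet?_neg_natCast L _ hk1 hk2]
    have ht : L.length - (-s).toNat < L.length := by omega
    rw [List.getElem?_eq_getElem ht]
    have : (if -(((-s).toNat : Nat) : Int) < 0 then -(((-s).toNat : Nat) : Int) + 10 else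
        -(((-s).toNat : Nat) : Int)).toNat = L.length - (-s).toNat := by omega
    rw [this, List.getD_eq_getElem _ _ ht]

theorem pvE_row (P : Matrix (Fin 10) (Fin 10) ℤ) (t : Nat) (ht : t < 10) :
    (pvE P).getD t [] = List.ofFn (fun j => P ⟨t, ht⟩ j) := by
  rw [pvE, List.getD_eq_getElem _ _ (by simpa using ht), List.getElem_ofFn]

theorem pv_rowsum (P : Matrix (Fin 10) (Fin 10) ℤ) (t : Nat) (ht : t < 10) :
    ∑ k ∈ Finset.range 10, ((pvE P).getD t []).getD k 0 = ((pvE P).getD t []).sum := by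
  rw [pvE_row P t ht, List.sum_ofFn,
    ← Fin.sum_univ_eq_sum_range (fun k => (List.ofFn fun j => P ⟨t, ht⟩ j).getD k 0) 10]
  apply Finset.sum_congr rfl
  intro k _
  rw [List.getD_eq_getElem _ _ (by simpa using k.isLt), List.getElem_ofFn]

-- ===== B's power =====
theorem pv_powB (k : Nat) : ∀ (n : Int), n.toNat = k → pvMatPow n = pvE (pvM ^ k) := by
  induction k using Nat.strong_induction_on with
  | _ k ih =>
    intro n hn
    rw [pvMatPow]
    by_cases h : n ≤ 0
    · rw [dif_pos h]
      have hk0 : k = 0 := by omega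
      rw [hk0, pow_zero, pv_idB_eq]
    · rw [dif_neg h]
      have hk1 : 1 ≤ k := by omega
      have hfd : PySem.Int.floordiv n 2 = n / 2 := PySem.Int.floordiv_eq_ediv_of_pos (by omega)
      have hmd : PySem.Int.mod n 2 = n % 2 := PySem.Int.mod_eq_emod_of_pos (by omega)
      have h2 : (n / 2).toNat = k / 2 := by omega
      rw [hfd, ih (k / 2) (by omega) (n / 2) h2]
      simp only [pv_bridgeB, ← pow_add, hmd, pv_adj_eq]
      by_cases ho : n % 2 = 0
      · rw [if_neg (by omega : ¬ (n % 2 ≠ 0))]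
        have hke : k % 2 = 0 := by omega
        congr 2
        omega
      · rw [if_pos (by omega : (n % 2 ≠ 0)), ← pow_succ]
        have hko : k % 2 = 1 := by omega
        congr 2
        omega

-- ===== A's characterization =====
theorem pv_A_char (s n : Int) (h1 : -10 ≤ s) (h2 : s < 10) :
    count_sequences_log s n
      = ∑ k ∈ Finset.range 10,
          ((pvE (pvM ^ n.natAbs)).getD ((if s < 0 then s + 10 else s).toNat) []).getD k 0 := by
  unfold count_sequences_log
  simp only
  have hne : (if n < 0 then 'b' :: pvBin n.natAbs else pvBin n.natAbs) ≠ [] := by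
    split
    · simp
    · exact pv_bin_ne_nil _
  obtain ⟨c0, rest, hr⟩ : ∃ c0 rest,
      (if n < 0 then 'b' :: pvBin n.natAbs else pvBin n.natAbs).reverse = c0 :: rest := by
    cases hcr : (if n < 0 then 'b' :: pvBin n.natAbs else pvBin n.natAbs).reverse with
    | nil => exact absurd (by simpa using congrArg List.reverse hcr) hne
    | cons a b => exact ⟨a, b, rfl⟩
  have hval : pvOfBits ((if n < 0 then 'b' :: pvBin n.natAbs else pvBin n.natAbs).reverse)
      = n.natAbs := by
    by_cases hn : n < 0
    · rw [if_pos hn, List.reverse_cons, pv_ofBits_append_b _ _ (by decide)]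
      exact pv_ofBits_bin _
    · rw [if_neg hn]
      exact pv_ofBits_bin _
  rw [hr] at hval
  rw [hr, List.zipIdx_cons, List.foldl_cons]
  have hstep0 : pvStepA
      ((List.range 10).map (fun j => (List.range 10).map (fun i => if i = j then (1 : Int) else 0)), [])
      (c0, 0)
      = (pvE (pvM ^ (if c0 = '1' then 1 else 0)), pvE (pvM ^ (2 ^ ((1 : Nat) - 1)))) := by
    unfold pvStepA
    simp only [pv_idA_eq, pv_neighbors_eq]
    by_cases hc : c0 = '1' <;> simp [hc, pv_bridgeA, pow_one, pow_zero]
  rw [hstep0, pv_loopA rest 1 one_pos (if c0 = '1' then 1 else 0)]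
  have he : (if c0 = '1' then 1 else 0) + 2 ^ 1 * pvOfBits rest = n.natAbs := by
    rw [← hval, pvOfBits]
    ring
  rw [he, pv_ones, pv_pyget10 _ (by simp) s h1 h2 []]
  have ht : (if s < 0 then s + 10 else s).toNat < 10 := by omega
  rw [Option.bind_some, pv_getD_map_range _ 10 _ ht, PySem.List.pyGet?_zero_cons,
    Option.getD_some]

-- ===== B's characterization =====
theorem pv_B_char (s n : Int) (h1 : -10 ≤ s) (h2 : s < 10) (k : Nat)
    (hk : pvMatPow n = pvE (pvM ^ k)) :
    count_sequences_log_alt s n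
      = ∑ j ∈ Finset.range 10,
          ((pvE (pvM ^ k)).getD ((if s < 0 then s + 10 else s).toNat) []).getD j 0 := by
  unfold count_sequences_log_alt
  rw [hk, pv_pyget10 _ (pvE_length _) s h1 h2 [], Option.getD_some,
    pv_rowsum _ _ (by omega)]

theorem pv_final_eq (s n : Int) (h1 : -10 ≤ s) (h2 : s < 10) (hn : ¬ n < 0) :
    count_sequences_log s n = count_sequences_log_alt s n := by
  rw [pv_A_char s n h1 h2, pv_B_char s n h1 h2 n.toNat (pv_powB n.toNat n rfl)]
  have h : n.natAbs = n.toNat := by omega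
  rw [h]

theorem pv_changed_A : count_sequences_log 0 (-1) = 2 := by
  rw [pv_A_char 0 (-1) (by norm_num) (by norm_num)]
  decide

theorem pv_changed_B : count_sequences_log_alt 0 (-1) = 1 := by
  rw [pv_B_char 0 (-1) (by norm_num) (by norm_num) 0 (pv_powB 0 (-1) rfl)]
  decide

-- tight experiment
def pvR (k : Nat) (i : Fin 10) : ℤ := ∑ j, (pvM ^ k) i j

theorem pvR_zero (i : Fin 10) : pvR 0 i = 1 := by
  unfold pvR
  rw [pow_zero]
  simp [Matrix.one_apply]

theorem pvR_succ (k : Nat) (i : Fin 10) : pvR (k + 1) i = ∑ l, pvM i l * pvR k l := by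
  unfold pvR
  calc ∑ j, (pvM ^ (k + 1)) i j = ∑ j, ∑ l, pvM i l * (pvM ^ k) l j := by
        simp [pow_succ', Matrix.mul_apply]
    _ = ∑ l, ∑ j, pvM i l * (pvM ^ k) l j := Finset.sum_comm
    _ = ∑ l, pvM i l * ∑ j, (pvM ^ k) l j := by simp [Finset.mul_sum]

theorem pvR_ge_one : ∀ (k : Nat), ∀ i : Fin 10, i ≠ 5 → 1 ≤ pvR k i := by
  intro k
  induction k with
  | zero => intro i hi; rw [pvR_zero]
  | succ k ih =>
    intro i hi
    rw [pvR_succ]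
    fin_cases i <;>
      first
        | exact absurd (by decide) hi
        | (simp [Fin.sum_univ_succ, pvM, pvNeighbors, List.getD]
           linarith [ih 0 (by decide), ih 1 (by decide), ih 2 (by decide), ih 3 (by decide),
             ih 4 (by decide), ih 6 (by decide), ih 7 (by decide), ih 8 (by decide),
             ih 9 (by decide)])

theorem pvR_five (k : Nat) : pvR (k + 1) (5 : Fin 10) = 0 := by
  rw [pvR_succ]
  simp [Fin.sum_univ_succ, pvM, pvNeighbors, List.getD]

theorem pvR_ge_two (k : Nat) (hk : 1 ≤ k) (i : Fin 10) (hi : i ≠ 5) : 2 ≤ pvR k i := by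
  obtain ⟨m, rfl⟩ : ∃ m, k = m + 1 := ⟨k - 1, by omega⟩
  rw [pvR_succ]
  have ih := pvR_ge_one m
  fin_cases i <;>
    first
      | exact absurd (by decide) hi
      | (simp [Fin.sum_univ_succ, pvM, pvNeighbors, List.getD]
         linarith [ih 0 (by decide), ih 1 (by decide), ih 2 (by decide), ih 3 (by decide),
           ih 4 (by decide), ih 6 (by decide), ih 7 (by decide), ih 8 (by decide),
           ih 9 (by decide)])

theorem pv_rowsum_ne_one (k : Nat) (hk : 1 ≤ k) (i : Fin 10) : pvR k i ≠ 1 := by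
  by_cases hi : i = 5
  · subst hi
    obtain ⟨m, rfl⟩ : ∃ m, k = m + 1 := ⟨k - 1, by omega⟩
    rw [pvR_five]
    norm_num
  · have := pvR_ge_two k hk i hi
    omega

-- A's value as pvR, for the tight theorem
theorem pv_A_as_R (s n : Int) (h1 : -10 ≤ s) (h2 : s < 10) :
    count_sequences_log s n
      = pvR n.natAbs ⟨(if s < 0 then s + 10 else s).toNat, by omega⟩ := by
  rw [pv_A_char s n h1 h2]
  unfold pvR
  rw [← Fin.sum_univ_eq_sum_range (fun j =>
    ((pvE (pvM ^ n.natAbs)).getD ((if s < 0 then s + 10 else s).toNat) []).getD j 0) 10]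
  apply Finset.sum_congr rfl
  intro j _
  rw [pvE_getD _ _ _ (by omega) j.isLt]

theorem pv_B_neg (s n : Int) (h1 : -10 ≤ s) (h2 : s < 10) (hn : n < 0) :
    count_sequences_log_alt s n = 1 := by
  rw [pv_B_char s n h1 h2 0 (pv_powB 0 n (by omega))]
  rw [pv_rowsum _ _ (by omega : (if s < 0 then s + 10 else s).toNat < 10)]
  rw [pvE_row _ _ (by omega : (if s < 0 then s + 10 else s).toNat < 10), List.sum_ofFn]
  rw [pow_zero]
  simp [Matrix.one_apply]

theorem pv_tight (s n : Int) (h1 : -10 ≤ s) (h2 : s < 10) (hn : n < 0) :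
    count_sequences_log s n ≠ count_sequences_log_alt s n := by
  rw [pv_B_neg s n h1 h2 hn, pv_A_as_R s n h1 h2]
  exact pv_rowsum_ne_one n.natAbs (by omega) _

-- ===== VERDICT (by name: the statement is the Claim_ definition above) =====
theorem count_sequences_log_spec : Claim_unchanged_count_sequences_log := by
  intro s n _ hpre
  unfold Spec_count_sequences_log
  intro hnd
  unfold D_count_sequences_log at hnd
  unfold Pre_count_sequences_log at hpre
  exact pv_final_eq s n hpre.1 hpre.2 hnd

theorem count_sequences_log_changed : Claim_changed_count_sequences_log := by
  unfold Claim_changed_count_sequences_log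
  exact ⟨by decide, by decide, by decide, pv_changed_A, pv_changed_B, by decide⟩

theorem count_sequences_log_tight : Claim_exact_count_sequences_log := by
  intro s n _ hpre hD
  unfold Pre_count_sequences_log at hpre
  unfold D_count_sequences_log at hD
  exact pv_tight s n hpre.1 hpre.2 hD
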